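-- pv_equiv track=rewrite | github.com/NorthblueM/IM-position-effect-paper-scripts | stats_im_ions/general_link/util_plink_result.py | get_modcnt_str
-- ===== SOURCE A (Python) =====
-- def get_modcnt_str(site2mod):
--     if not site2mod:
--         mod_str = '0*null'
--     else:
--         mod2cnt = {}
--         for mod_site, mod_name in site2mod.items():
--             if mod_name in mod2cnt:
--                 mod2cnt[mod_name] += 1
--             else:
--                 mod2cnt[mod_name] = 1
--         # 按照修饰名称排序
--         mod2cnt = dict(sorted(mod2cnt.items(), key=lambda x:x[0],reverse=False))
--         mod_str = ';'.join([str(mod_cnt)+'*'+mod_name for mod_name, mod_cnt in mod2cnt.items()])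
--     return mod_str
-- ===== SOURCE B (Python) =====
-- def get_modcnt_str(site2mod):
--     if not site2mod:
--         return '0*null'
--     names = sorted(site2mod.values())
--     parts = []
--     cur = names[0]
--     cnt = 1
--     for name in names[1:]:
--         if name == cur:
--             cnt += 1
--         else:
--             parts.append(str(cnt) + '*' + cur)
--             cur = name
--             cnt = 1
--     parts.append(str(cnt) + '*' + cur)
--     return ';'.join(parts)
-- ===== Notes on version B (the rewrite author's own statement) =====
-- stated objective: alternative
-- what changed: Replaces the hash-map counting pass plus key-sort of the dict items by sorting the mod names first and run-length-counting consecutive equal names in a single scan, with no dictionary at all.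
import Mathlib
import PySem

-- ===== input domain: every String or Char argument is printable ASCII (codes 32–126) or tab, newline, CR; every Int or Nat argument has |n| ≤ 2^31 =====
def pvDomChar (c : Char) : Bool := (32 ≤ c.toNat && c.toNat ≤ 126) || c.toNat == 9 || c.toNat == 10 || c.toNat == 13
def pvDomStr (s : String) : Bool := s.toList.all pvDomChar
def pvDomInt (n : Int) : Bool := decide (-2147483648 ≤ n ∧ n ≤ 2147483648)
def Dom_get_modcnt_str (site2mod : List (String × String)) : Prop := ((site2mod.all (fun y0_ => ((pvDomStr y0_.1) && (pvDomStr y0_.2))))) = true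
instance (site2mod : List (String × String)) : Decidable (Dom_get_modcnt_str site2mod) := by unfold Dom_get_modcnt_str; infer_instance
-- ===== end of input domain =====

-- B replaces A's hash-map counting + key-sort of the items by sort-the-names-first and a
-- single run-length-counting scan over the sorted names (objective: alternative algorithm).

-- ===== PORT A =====
def get_modcnt_str (site2mod : List (String × String)) : String :=
  match site2mod with
  | [] => "0*null"                            -- if not site2mod: '0*null'
  | _ =>
    -- counting loop: `if mod_name in mod2cnt: += 1 else: = 1` (in the += branch the key is
    -- present, so `mod2cnt[mod_name]` is `getD mod_name 0`)
    let mod2cnt := site2mod.foldl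
      (fun d p => if d.contains p.2 then d.insert p.2 (d.getD p.2 0 + 1) else d.insert p.2 1)
      (PySem.Dict.empty : PySem.Dict String Int)
    -- mod2cnt = dict(sorted(mod2cnt.items(), key=lambda x: x[0], reverse=False))
    let sortedD := PySem.Dict.ofList (PySem.List.sorted mod2cnt.items (fun x => x.1) false)
    PySem.Str.join ";" (sortedD.items.map (fun p => PySem.Int.toStr p.2 ++ "*" ++ p.1))

-- ===== PORT B =====
-- one-pass run-length loop of Source B over the tail of the sorted name list:
-- state (cur, cnt, emitted parts); emits str(cnt)+'*'+cur at each run boundary and at the end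
def runStrs (cur : String) (cnt : Nat) : List String → List String
  | [] => [PySem.Int.toStr (cnt : Int) ++ "*" ++ cur]
  | x :: xs =>
    if x == cur then runStrs cur (cnt + 1) xs
    else (PySem.Int.toStr (cnt : Int) ++ "*" ++ cur) :: runStrs x 1 xs

def get_modcnt_str_alt (site2mod : List (String × String)) : String :=
  if site2mod.isEmpty then "0*null"
  else
    match PySem.List.sorted (site2mod.map Prod.snd) (fun x => x) false with
    | [] => "0*null"     -- unreachable: sorted of a nonempty list is nonempty (names[0] is safe)
    | n :: rest => PySem.Str.join ";" (runStrs n 1 rest)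

-- ===== PRECONDITION & SPEC =====
-- site2mod stands for a Python dict, whose keys are necessarily distinct; association lists
-- with duplicate keys represent no dict input of A, so they lie outside Pre_.
def Pre_get_modcnt_str (site2mod : List (String × String)) : Prop :=
  (site2mod.map Prod.fst).Nodup
instance (site2mod : List (String × String)) : Decidable (Pre_get_modcnt_str site2mod) := by
  unfold Pre_get_modcnt_str; infer_instance
def pvWitness_get_modcnt_str : (List (String × String)) :=
  [("S3", "Oxidation"), ("N1", "Acetyl"), ("S7", "Oxidation")]

def Spec_get_modcnt_str (site2mod : List (String × String)) (out : String) : Prop :=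
  out = get_modcnt_str_alt site2mod
instance (site2mod : List (String × String)) (out : String) :
    Decidable (Spec_get_modcnt_str site2mod out) := by unfold Spec_get_modcnt_str; infer_instance

-- ===== CLAIM (what is proved, stated in full; the proofs are below) =====
def Claim_equal_get_modcnt_str : Prop :=
  ∀ (site2mod : List (String × String)), Dom_get_modcnt_str site2mod →
    Pre_get_modcnt_str site2mod → Spec_get_modcnt_str site2mod (get_modcnt_str site2mod)

-- ===== LEMMAS AND PROOFS =====

-- first occurrences, in order (on a ≤-sorted list: the distinct names in increasing order)
def heads : List String → List String
  | [] => []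
  | x :: xs => x :: heads (xs.filter (fun y => !(y == x)))
termination_by l => l.length
decreasing_by
  calc (List.filter _ xs.attach).unattach.length
        ≤ xs.attach.length := le_trans (by rw [List.length_unattach]) (List.length_filter_le _ _)
    _ = xs.length := List.length_attach ..
    _ < (x :: xs).length := by simp

theorem heads_nil : heads [] = [] := by rw [heads]

theorem heads_cons (x : String) (xs : List String) :
    heads (x :: xs) = x :: heads (xs.filter (fun y => !(y == x))) := by rw [heads]

-- induction along heads' recursion (stated cleanly, proved by strong induction on length)
theorem heads_ind (P : List String → Prop) (h0 : P [])
    (h1 : ∀ x xs, P (xs.filter (fun y => !(y == x))) → P (x :: xs)) (l : List String) : P l := by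
  induction hl : l.length using Nat.strong_induction_on generalizing l with
  | _ n ih =>
    match l with
    | [] => exact h0
    | x :: xs =>
      apply h1
      exact ih _ (by subst hl; exact Nat.lt_succ_of_le (List.length_filter_le _ _)) _ rfl

def fmt (k : String) (c : Int) : String := PySem.Int.toStr c ++ "*" ++ k

theorem mem_of_mem_heads : ∀ (l : List String) (k : String), k ∈ heads l → k ∈ l := by
  intro l
  induction l using heads_ind with
  | h0 => intro k h; simp [heads_nil] at h
  | h1 x xs ih =>
    intro k h
    rw [heads_cons] at h
    rcases List.mem_cons.1 h with h | h
    · simp [h]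
    · exact List.mem_cons_of_mem _ (List.mem_of_mem_filter (ih k h))

theorem mem_heads : ∀ (l : List String) (k : String), k ∈ heads l ↔ k ∈ l := by
  intro l
  induction l using heads_ind with
  | h0 => intro k; simp [heads_nil]
  | h1 x xs ih =>
    intro k
    constructor
    · exact mem_of_mem_heads _ k
    · intro h
      rw [heads_cons]
      rcases List.mem_cons.1 h with h | h
      · simp [h]
      · by_cases hx : k = x
        · simp [hx]
        · refine List.mem_cons_of_mem _ ((ih k).2 ?_)
          simp [List.mem_filter, h, hx]

theorem nodup_heads : ∀ (l : List String), (heads l).Nodup := by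
  intro l
  induction l using heads_ind with
  | h0 => simp [heads_nil]
  | h1 x xs ih =>
    rw [heads_cons]
    refine List.nodup_cons.2 ⟨?_, ih⟩
    intro hx
    have := List.mem_filter.1 (mem_of_mem_heads _ _ hx)
    simp at this

theorem pairwise_lt_heads : ∀ (l : List String), l.Pairwise (· ≤ ·) →
    (heads l).Pairwise (· < ·) := by
  intro l
  induction l using heads_ind with
  | h0 => intro _; simp [heads_nil]
  | h1 x xs ih =>
    intro hp
    rcases List.pairwise_cons.1 hp with ⟨hle, htl⟩
    rw [heads_cons]
    refine List.pairwise_cons.2 ⟨?_, ih (htl.filter _)⟩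
    intro y hy
    have hmem := List.mem_filter.1 (mem_of_mem_heads _ _ hy)
    have hne : ¬(y == x) = true := by simpa using hmem.2
    have := hle y hmem.1
    exact lt_of_le_of_ne this (by intro h; exact hne (by simp [h.symm]))

-- the core run-length invariant: on a sorted tail whose elements all dominate cur,
-- runStrs emits cur with cnt + (its multiplicity) and then one entry per later distinct name
theorem runStrs_eq : ∀ (l : List String) (cur : String) (cnt : Nat),
    (∀ x ∈ l, cur ≤ x) → l.Pairwise (· ≤ ·) →
    runStrs cur cnt l =
      fmt cur ((cnt : Int) + l.count cur) ::
        (heads (l.filter (fun y => !(y == cur)))).map (fun k => fmt k (l.count k)) := by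
  intro l
  induction l with
  | nil => intro cur cnt _ _; simp [runStrs, fmt, heads_nil]
  | cons x xs ih =>
    intro cur cnt hdom hp
    rcases List.pairwise_cons.1 hp with ⟨hle, htl⟩
    by_cases hx : x = cur
    · subst hx
      rw [runStrs, if_pos (by simp)]
      rw [ih x (cnt + 1) hle htl]
      have hc : ((x :: xs).count x : Int) = (xs.count x : Int) + 1 := by
        simp [List.count_cons]
      have hf : (x :: xs).filter (fun y => !(y == x)) = xs.filter (fun y => !(y == x)) := by
        simp [List.filter_cons]
      rw [hf]
      congr 1
      · congr 1
        rw [hc]; push_cast; ring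
      · apply List.map_congr_left
        intro k hk
        have hne : ¬(k == x) = true := by
          simpa using (List.mem_filter.1 (mem_of_mem_heads _ _ hk)).2
        have hkx : x ≠ k := by intro h; exact hne (by simp [h])
        simp [List.count_cons, hkx]
    · have hcurx : cur < x := lt_of_le_of_ne (hdom x (by simp)) (Ne.symm hx)
      have hnocur : ∀ y ∈ xs, y ≠ cur := by
        intro y hy h
        exact absurd (hle y hy) (by rw [h]; exact not_le.2 hcurx)
      rw [runStrs, if_neg (by simp [hx])]
      rw [ih x 1 hle htl]
      have hcount0 : (x :: xs).count cur = 0 := by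
        rw [List.count_eq_zero]
        intro h
        rcases List.mem_cons.1 h with h | h
        · exact hx h.symm
        · exact hnocur cur h rfl
      have hfx : xs.filter (fun y => !(y == cur)) = xs := by
        apply List.filter_eq_self.2
        intro y hy; simpa using hnocur y hy
      have hf : (x :: xs).filter (fun y => !(y == cur)) = x :: xs := by
        simp [List.filter_cons, hx, hfx]
      rw [hf, heads_cons]
      congr 1
      · congr 1
        rw [hcount0]; push_cast; ring
      · rw [List.map_cons]
        congr 1
        · congr 1
          simp [List.count_cons]
          push_cast; ring
        · apply List.map_congr_left
          intro k hk
          have hmem := List.mem_filter.1 (mem_of_mem_heads _ _ hk)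
          have hkx : x ≠ k := by
            intro h; have := hmem.2; simp [h] at this
          simp [List.count_cons, hkx]

-- heads of the sorted value list IS sorted(set(values))
theorem heads_sorted_eq (vals : List String) :
    PySem.List.sorted (PySem.Set.ofList vals) (fun x => x) false =
      heads (PySem.List.sorted vals (fun x => x) false) := by
  set S := PySem.List.sorted vals (fun x => x) false with hS
  apply PySem.List.sorted_eq_of_perm_of_pairwise_lt
  · refine (List.perm_ext_iff_of_nodup (nodup_heads S) ?_).2 ?_
    · exact PySem.Set.nodup_ofList vals
    · intro a
      rw [mem_heads, PySem.Set.mem_ofList]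
      rw [hS]
      exact PySem.List.mem_sorted vals _ false a
  · exact pairwise_lt_heads S (by simpa [hS] using PySem.List.sorted_pairwise vals (fun x => x))

-- A's counting loop is Counter(values)
theorem countLoop_eq (site2mod : List (String × String)) :
    site2mod.foldl
      (fun d p => if d.contains p.2 then d.insert p.2 (d.getD p.2 0 + 1) else d.insert p.2 1)
      (PySem.Dict.empty : PySem.Dict String Int)
      = PySem.Dict.counter (site2mod.map Prod.snd) := by
  have hstep : (fun (d : PySem.Dict String Int) (p : String × String) =>
      if d.contains p.2 then d.insert p.2 (d.getD p.2 0 + 1) else d.insert p.2 1)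
      = fun d p => d.insert p.2 (d.getD p.2 0 + 1) := by
    funext d p
    by_cases h : d.contains p.2
    · simp [h]
    · rw [if_neg (by simpa using h)]
      rw [PySem.Dict.getD_of_not_contains _ _ (by simpa using h)]
      norm_num
  rw [hstep, ← PySem.Dict.foldl_insert_getD_add_one_eq_counter]
  exact (List.foldl_map (f := Prod.snd)
    (g := fun (d : PySem.Dict String Int) x => d.insert x (d.getD x 0 + 1))
    (l := site2mod) (init := PySem.Dict.empty)).symm

-- keys of the sorted items list are distinct, so dict(...) keeps it as is
theorem items_ofList_nodup (l : List (String × Int)) (h : (l.map Prod.fst).Nodup) :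
    (PySem.Dict.ofList l).items = l := by
  have : PySem.Dict.ofList l = l.foldl (fun d p => d.insert p.1 p.2) PySem.Dict.empty := rfl
  rw [this]
  have := PySem.Dict.items_foldl_insert_fresh (l := l) (k := Prod.fst) (v := Prod.snd)
    (d := PySem.Dict.empty) (by intro a _; simp) h
  simpa using this

-- ===== VERDICT (by name: the statement is the Claim_ definition above) =====
theorem get_modcnt_str_spec : Claim_equal_get_modcnt_str := by
  intro site2mod _ _
  unfold Spec_get_modcnt_str
  match hsm : site2mod with
  | [] => rfl
  | q :: qs =>
    rw [get_modcnt_str, get_modcnt_str_alt] <;> try (intro h; cases h)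
    rw [if_neg (by simp)]
    set vals := (q :: qs).map Prod.snd with hvals
    rw [countLoop_eq, PySem.Dict.items_counter]
    -- name the sorted items list
    have hsorted : PySem.List.sorted
        ((PySem.Set.ofList vals).map (fun k => (k, (vals.count k : Int)))) (fun x => x.1) false
        = (PySem.List.sorted (PySem.Set.ofList vals) (fun x => x) false).map
            (fun k => (k, (vals.count k : Int))) := by
      apply PySem.List.sorted_eq_of_perm_of_pairwise_lt
      · exact (PySem.List.sorted_perm (PySem.Set.ofList vals) (fun x => x) false).map _
      · have := PySem.List.sorted_ofList_pairwise_lt vals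
        exact this.map _ (by intro a b h; simpa using h)
    rw [hsorted, items_ofList_nodup]
    · -- B side: split the sorted values
      have hne : PySem.List.sorted vals (fun x => x) false ≠ [] := by
        rw [Ne, PySem.List.sorted_eq_nil_iff]
        simp [hvals]
      match hS : PySem.List.sorted vals (fun x => x) false with
      | [] => exact absurd hS hne
      | n :: rest =>
        have hp : (n :: rest).Pairwise (· ≤ ·) := by
          rw [← hS]; simpa using PySem.List.sorted_pairwise vals (fun x => x)
        rcases List.pairwise_cons.1 hp with ⟨hle, htl⟩
        show _ = PySem.Str.join ";" (runStrs n 1 rest)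
        rw [runStrs_eq rest n 1 hle htl]
        rw [heads_sorted_eq, hS, heads_cons]
        simp only [List.map_cons, List.map_map]
        have hperm : (PySem.List.sorted vals (fun x => x) false).Perm vals :=
          PySem.List.sorted_perm vals (fun x => x) false
        rw [hS] at hperm
        congr 1
        congr 1
        · have hcv : vals.count n = (n :: rest).count n := (hperm.count_eq n).symm
          simp only [fmt, List.count_cons_self] at *
          congr 1
          rw [hcv]; push_cast; ring
        · apply List.map_congr_left
          intro k hk
          have hmem := List.mem_filter.1 (mem_of_mem_heads _ _ hk)
          have hne' : n ≠ k := by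
            intro h; have := hmem.2; simp [h] at this
          have hcv : vals.count k = (n :: rest).count k := (hperm.count_eq k).symm
          simp [fmt, hcv, List.count_cons, hne']
    · -- the mapped keys are the sorted distinct names, hence Nodup
      rw [List.map_map]
      have hid : (Prod.fst ∘ fun k => (k, (vals.count k : Int))) = id := rfl
      rw [hid, List.map_id]
      exact (PySem.List.sorted_ofList_pairwise_lt vals).nodup
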